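-- pv_equiv track=rewrite | github.com/vzwjustin/Boundary-mapper | boundary_mapper/rules_engine.py | _transitive_reachable
-- ===== SOURCE A (Python) =====
-- def _transitive_reachable(graph: dict[str, set[str]], roots: set[str]) -> set[str]:
--     """BFS/DFS: return all functions transitively reachable from roots."""
--     visited = set()
--     stack = list(roots)
--     while stack:
--         fn = stack.pop()
--         if fn in visited:
--             continue
--         visited.add(fn)
--         for callee in graph.get(fn, ()):
--             if callee not in visited:
--                 stack.append(callee)
--     return visited
-- ===== SOURCE B (Python) =====
-- def _transitive_reachable(graph: dict[str, set[str]], roots: set[str]) -> set[str]: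
--     """Recursive DFS: mark a node, then recurse into each of its callees."""
--     visited = set()
--
--     def visit(fn):
--         if fn not in visited:
--             visited.add(fn)
--             for callee in graph.get(fn, ()):
--                 visit(callee)
--
--     for fn in roots:
--         visit(fn)
--     return visited
-- ===== Notes on version B (the rewrite author's own statement) =====
-- stated objective: alternative
-- what changed: The explicit-stack while-loop (pop, re-check visited at pop, filtered pushes) is replaced by a per-node recursive visit function with no worklist, membership checked once at entry; both return the identical reachable set.
import Mathlib
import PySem

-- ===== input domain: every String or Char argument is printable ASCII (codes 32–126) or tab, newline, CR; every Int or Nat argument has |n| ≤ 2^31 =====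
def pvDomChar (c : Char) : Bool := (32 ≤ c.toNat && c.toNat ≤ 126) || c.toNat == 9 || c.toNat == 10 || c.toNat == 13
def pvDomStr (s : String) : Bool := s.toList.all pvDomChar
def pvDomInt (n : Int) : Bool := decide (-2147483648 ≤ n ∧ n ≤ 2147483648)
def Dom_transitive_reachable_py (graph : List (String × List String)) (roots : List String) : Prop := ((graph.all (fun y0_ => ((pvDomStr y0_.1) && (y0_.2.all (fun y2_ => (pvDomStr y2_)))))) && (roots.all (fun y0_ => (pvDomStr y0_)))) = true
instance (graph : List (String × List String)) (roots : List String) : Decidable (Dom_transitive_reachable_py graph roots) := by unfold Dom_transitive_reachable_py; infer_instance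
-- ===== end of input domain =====

-- B replaces A's explicit-stack worklist loop by a per-node recursive DFS (membership checked once
-- at entry, no stack, no push filtering); same reachable set, same cost (objective: alternative).
-- Both Pythons return a SET, and both iterate over SETS (roots, graph values), whose Python
-- iteration order is unspecified; each port fixes a linearization of those set iterations
-- (A's: list order; B's: back-to-front), under which the two visited lists coincide exactly.

-- ===== PORT A =====
-- graph.get(fn, ()) — first-match association-list lookup with default empty
def pvAdj (graph : List (String × List String)) (fn : String) : List String :=
  (PySem.Dict.mk graph).getD fn []

-- the 'while stack:' loop; fuel = an upper bound on the number of iterations (pops), which is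
-- at most the number of pushes = len(roots) + total adjacency size; fuel is only a totalization guard
def pvLoopA (graph : List (String × List String)) : Nat → PySem.Set String → List String → List String
  | _, visited, [] => visited
  | 0, visited, _ :: _ => visited
  | fuel+1, visited, h :: t =>
      let fn := (h :: t).getLast!          -- fn = stack.pop()
      let rest := (h :: t).dropLast
      if PySem.Set.contains visited fn then
        pvLoopA graph fuel visited rest
      else
        let visited' := PySem.Set.add visited fn
        pvLoopA graph fuel visited'
          ((pvAdj graph fn).foldl
            (fun st c => if PySem.Set.contains visited' c then st else st ++ [c]) rest)

def transitive_reachable_py (graph : List (String × List String)) (roots : List String) : List String :=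
  pvLoopA graph (roots.length + (graph.map (fun p => p.2.length)).sum + 1) PySem.Set.empty roots

-- ===== PORT B =====
-- visit(visited, fn): Source B's recursive DFS — entry check, mark, recurse into each callee.
-- 'for callee in graph.get(fn, ())' and 'for fn in roots' iterate Python SETS (no defined order);
-- this port linearizes each of those set iterations back-to-front (the resulting visited SET is
-- the same for any linearization; this one is the order the proof relates to A's stack pops).
-- fuel bounds the recursion depth (≤ number of graph keys + 1).
def pvVisitB (graph : List (String × List String)) : Nat → PySem.Set String → String → PySem.Set String
  | 0, visited, _ => visited
  | fuel+1, visited, fn =>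
      if PySem.Set.contains visited fn then visited
      else ((pvAdj graph fn).reverse).foldl (fun v c => pvVisitB graph fuel v c)
             (PySem.Set.add visited fn)

def transitive_reachable_py_alt (graph : List (String × List String)) (roots : List String) : List String :=
  (roots.reverse).foldl (fun v fn => pvVisitB graph (graph.length + 1) v fn) PySem.Set.empty

-- ===== PRECONDITION & SPEC =====
def Spec_transitive_reachable_py (graph : List (String × List String)) (roots : List String) (out : List String) : Prop := out = transitive_reachable_py_alt graph roots
instance (graph : List (String × List String)) (roots : List String) (out : List String) : Decidable (Spec_transitive_reachable_py graph roots out) := by unfold Spec_transitive_reachable_py; infer_instance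

-- ===== CLAIM (what is proved, stated in full; the proofs are below) =====
def Claim_equal_transitive_reachable_py : Prop := ∀ (graph : List (String × List String)) (roots : List String), Dom_transitive_reachable_py graph roots → Spec_transitive_reachable_py graph roots (transitive_reachable_py graph roots)

-- ===== LEMMAS AND PROOFS =====

-- number of graph keys not yet visited (bounds B's recursion depth)
def pvK (graph : List (String × List String)) (v : PySem.Set String) : Nat :=
  ((graph.map Prod.fst).filter (fun k => !(PySem.Set.contains v k))).length

-- total adjacency size of unvisited keys (bounds A's remaining pushes)
def pvP (graph : List (String × List String)) (v : PySem.Set String) : Nat :=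
  ((graph.filter (fun p => !(PySem.Set.contains v p.1))).map (fun p => p.2.length)).sum

lemma pv_contains_iff (v : PySem.Set String) (x : String) :
    PySem.Set.contains v x = true ↔ x ∈ v := by
  simp [PySem.Set.contains]

lemma pv_add_eq_append (v : PySem.Set String) (fn : String)
    (h : fn ∉ v) : PySem.Set.add v fn = v ++ [fn] := by
  simp [PySem.Set.add, h]

lemma pvVisitB_skip (graph : List (String × List String)) (f : Nat) (v : PySem.Set String)
    (fn : String) (h : fn ∈ v) : pvVisitB graph f v fn = v := by
  cases f <;> simp [pvVisitB, h]

lemma pv_foldl_prefix {g : PySem.Set String → String → PySem.Set String}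
    (hg : ∀ u c, ∃ t, g u c = u ++ t) :
    ∀ (cs : List String) (u : PySem.Set String), ∃ t, cs.foldl g u = u ++ t := by
  intro cs
  induction cs with
  | nil => exact fun u => ⟨[], by simp⟩
  | cons c cs ih =>
      intro u
      obtain ⟨t₁, h₁⟩ := hg u c
      obtain ⟨t₂, h₂⟩ := ih (g u c)
      exact ⟨t₁ ++ t₂, by rw [List.foldl_cons, h₂, h₁, List.append_assoc]⟩

lemma pvVisitB_prefix (graph : List (String × List String)) :
    ∀ (f : Nat) (v : PySem.Set String) (fn : String), ∃ t, pvVisitB graph f v fn = v ++ t := by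
  intro f
  induction f with
  | zero => exact fun v fn => ⟨[], by simp [pvVisitB]⟩
  | succ f ih =>
      intro v fn
      by_cases h : fn ∈ v
      · exact ⟨[], by simp [pvVisitB, h]⟩
      · obtain ⟨t, ht⟩ := pv_foldl_prefix (fun u c => ih u c) ((pvAdj graph fn).reverse)
          (PySem.Set.add v fn)
        refine ⟨[fn] ++ t, ?_⟩
        have : pvVisitB graph (f+1) v fn =
            ((pvAdj graph fn).reverse).foldl (fun u c => pvVisitB graph f u c)
              (PySem.Set.add v fn) := by
          simp [pvVisitB, h]
        rw [this, ht, pv_add_eq_append v fn h, List.append_assoc]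

lemma pvK_le (graph : List (String × List String)) (v : PySem.Set String) :
    pvK graph v ≤ graph.length := by
  unfold pvK
  exact le_trans (List.length_filter_le _ _) (by simp)

lemma pv_contains_eq_false (v : PySem.Set String) (x : String) :
    PySem.Set.contains v x = false ↔ x ∉ v := by
  constructor
  · intro h hm
    have := (pv_contains_iff v x).mpr hm
    rw [h] at this
    exact absurd this (by simp)
  · intro h
    cases hc : PySem.Set.contains v x
    · rfl
    · exact absurd ((pv_contains_iff v x).mp hc) h

lemma pvK_mono (graph : List (String × List String)) (v v' : PySem.Set String)
    (h : ∀ x, x ∈ v → x ∈ v') : pvK graph v' ≤ pvK graph v := by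
  unfold pvK
  rw [← List.countP_eq_length_filter, ← List.countP_eq_length_filter]
  apply List.countP_mono_left
  intro a _ ha
  simp only [Bool.not_eq_true'] at ha ⊢
  rw [pv_contains_eq_false] at ha ⊢
  exact fun hm => ha (h a hm)

lemma pv_filter_sub_lt (v : PySem.Set String) (fn : String) (hfn : fn ∉ v) :
    ∀ (l : List String), fn ∈ l →
      (l.filter (fun k => !(PySem.Set.contains (PySem.Set.add v fn) k))).length <
      (l.filter (fun k => !(PySem.Set.contains v k))).length := by
  intro l
  induction l with
  | nil => intro h; cases h
  | cons k l ih =>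
      intro hk
      have hle : (l.filter (fun k => !(PySem.Set.contains (PySem.Set.add v fn) k))).length ≤
          (l.filter (fun k => !(PySem.Set.contains v k))).length := by
        rw [← List.countP_eq_length_filter, ← List.countP_eq_length_filter]
        apply List.countP_mono_left
        intro a _ ha
        simp only [Bool.not_eq_true'] at ha ⊢
        rw [pv_contains_eq_false] at ha ⊢
        exact fun hm => ha ((PySem.Set.mem_add v fn a).mpr (Or.inl hm))
      by_cases hkfn : k = fn
      · subst hkfn
        have hm1 : k ∈ PySem.Set.add v k := (PySem.Set.mem_add v k k).mpr (Or.inr rfl)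
        rw [List.filter_cons_of_neg (by simp [hm1]), List.filter_cons_of_pos (by simp [hfn]),
          List.length_cons]
        omega
      · have hk' : fn ∈ l := by
          rcases List.mem_cons.mp hk with h' | h'
          · exact absurd h'.symm hkfn
          · exact h'
        have hlt := ih hk'
        by_cases hkv : k ∈ v
        · have hm1 : k ∈ PySem.Set.add v fn := (PySem.Set.mem_add v fn k).mpr (Or.inl hkv)
          rw [List.filter_cons_of_neg (by simp [hm1]), List.filter_cons_of_neg (by simp [hkv])]
          exact hlt
        · have hm1 : k ∉ PySem.Set.add v fn := by
            intro hm
            rcases (PySem.Set.mem_add v fn k).mp hm with h | h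
            · exact hkv h
            · exact hkfn h
          rw [List.filter_cons_of_pos (by simp [hm1]), List.filter_cons_of_pos (by simp [hkv]),
            List.length_cons, List.length_cons]
          omega

lemma pvK_add_lt (graph : List (String × List String)) (v : PySem.Set String) (fn : String)
    (hkey : fn ∈ graph.map Prod.fst) (h : fn ∉ v) :
    pvK graph (PySem.Set.add v fn) < pvK graph v :=
  pv_filter_sub_lt v fn h (graph.map Prod.fst) hkey

lemma pvAdj_cons (k : String) (vs : List String) (g : List (String × List String)) (fn : String) :
    pvAdj ((k, vs) :: g) fn = if k == fn then vs else pvAdj g fn := by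
  unfold pvAdj PySem.Dict.getD PySem.Dict.get?
  cases h : (k == fn) <;> simp [List.find?, h]

lemma pvAdj_eq_nil (graph : List (String × List String)) (fn : String)
    (h : fn ∉ graph.map Prod.fst) : pvAdj graph fn = [] := by
  unfold pvAdj PySem.Dict.getD PySem.Dict.get?
  have : List.find? (fun p => p.1 == fn) graph = none := by
    rw [List.find?_eq_none]
    intro p hp hbeq
    exact h (List.mem_map.mpr ⟨p, hp, by simpa using hbeq⟩)
  simp [this]

lemma pvP_cons_mem (p : String × List String) (g : List (String × List String))
    (v : PySem.Set String) (h : p.1 ∈ v) : pvP (p :: g) v = pvP g v := by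
  unfold pvP
  rw [List.filter_cons_of_neg (by simp [h])]

lemma pvP_cons_not_mem (p : String × List String) (g : List (String × List String))
    (v : PySem.Set String) (h : p.1 ∉ v) : pvP (p :: g) v = p.2.length + pvP g v := by
  unfold pvP
  rw [List.filter_cons_of_pos (by simp [h])]
  simp

lemma pvP_mono (graph : List (String × List String)) (v v' : PySem.Set String)
    (h : ∀ x, x ∈ v → x ∈ v') : pvP graph v' ≤ pvP graph v := by
  induction graph with
  | nil => simp [pvP]
  | cons p g ih =>
      by_cases hb : p.1 ∈ v'
      · rw [pvP_cons_mem p g v' hb]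
        by_cases ha : p.1 ∈ v
        · rw [pvP_cons_mem p g v ha]; exact ih
        · rw [pvP_cons_not_mem p g v ha]; omega
      · have ha : p.1 ∉ v := fun hm => hb (h _ hm)
        rw [pvP_cons_not_mem p g v' hb, pvP_cons_not_mem p g v ha]
        omega

lemma pvP_add (graph : List (String × List String)) (v : PySem.Set String) (fn : String)
    (h : fn ∉ v) :
    pvP graph (PySem.Set.add v fn) + (pvAdj graph fn).length ≤ pvP graph v := by
  induction graph with
  | nil =>
      have : pvAdj ([] : List (String × List String)) fn = [] :=
        pvAdj_eq_nil [] fn (by simp)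
      simp [pvP, this]
  | cons p g ih =>
      obtain ⟨k, vs⟩ := p
      rw [pvAdj_cons]
      by_cases hk : k = fn
      · subst hk
        have hm1 : (k, vs).1 ∈ PySem.Set.add v k := (PySem.Set.mem_add v k k).mpr (Or.inr rfl)
        rw [pvP_cons_mem _ g _ hm1, pvP_cons_not_mem _ g v h, if_pos (by simp)]
        have hmono := pvP_mono g v (PySem.Set.add v k)
          (fun x hx => (PySem.Set.mem_add v k x).mpr (Or.inl hx))
        dsimp only at *
        omega
      · rw [if_neg (by simp [hk])]
        by_cases hkv : k ∈ v
        · have hm1 : (k, vs).1 ∈ PySem.Set.add v fn := (PySem.Set.mem_add v fn k).mpr (Or.inl hkv)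
          rw [pvP_cons_mem _ g _ hm1, pvP_cons_mem _ g v hkv]
          exact ih
        · have hm1 : (k, vs).1 ∉ PySem.Set.add v fn := by
            intro hm
            rcases (PySem.Set.mem_add v fn k).mp hm with h' | h'
            · exact hkv h'
            · exact hk h'
          rw [pvP_cons_not_mem _ g _ hm1, pvP_cons_not_mem _ g v hkv]
          omega

lemma pv_foldl_congr_inv {g₁ g₂ : PySem.Set String → String → PySem.Set String}
    {w : PySem.Set String}
    (hpre : ∀ u c, ∃ t, g₁ u c = u ++ t)
    (hcong : ∀ u c, (∀ x, x ∈ w → x ∈ u) → g₁ u c = g₂ u c) :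
    ∀ (cs : List String) (u : PySem.Set String), (∀ x, x ∈ w → x ∈ u) →
      cs.foldl g₁ u = cs.foldl g₂ u := by
  intro cs
  induction cs with
  | nil => intro u _; rfl
  | cons c cs ih =>
      intro u hu
      have h1 : g₁ u c = g₂ u c := hcong u c hu
      obtain ⟨t, ht⟩ := hpre u c
      have hu' : ∀ x, x ∈ w → x ∈ g₁ u c := by
        intro x hx; rw [ht]; exact List.mem_append_left _ (hu x hx)
      simp only [List.foldl_cons]
      rw [← h1, ih (g₁ u c) hu']

lemma pv_foldl_skip_filter {g : PySem.Set String → String → PySem.Set String}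
    {w : PySem.Set String}
    (hpre : ∀ u c, ∃ t, g u c = u ++ t)
    (hskip : ∀ u c, c ∈ u → g u c = u) :
    ∀ (cs : List String) (u : PySem.Set String), (∀ x, x ∈ w → x ∈ u) →
      (cs.filter (fun c => !(PySem.Set.contains w c))).foldl g u = cs.foldl g u := by
  intro cs
  induction cs with
  | nil => intro u _; rfl
  | cons c cs ih =>
      intro u hu
      by_cases hc : c ∈ w
      · have hc' : PySem.Set.contains w c = true := (pv_contains_iff w c).mpr hc
        simp only [List.filter_cons, hc', Bool.not_true, List.foldl_cons]
        rw [hskip u c (hu c hc)]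
        exact ih u hu
      · have hc' : PySem.Set.contains w c = false := by
          rw [← Bool.not_eq_true, pv_contains_iff]; exact hc
        simp only [List.filter_cons, hc', Bool.not_false, List.foldl_cons]
        obtain ⟨t, ht⟩ := hpre u c
        refine ih (g u c) ?_
        intro x hx
        rw [ht]; exact List.mem_append_left _ (hu x hx)

lemma pvVisitB_fuel_congr (graph : List (String × List String)) :
    ∀ (n f₁ f₂ : Nat) (v : PySem.Set String) (fn : String),
      pvK graph v < n → pvK graph v < f₁ → pvK graph v < f₂ →
      pvVisitB graph f₁ v fn = pvVisitB graph f₂ v fn := by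
  intro n
  induction n with
  | zero => intro f₁ f₂ v fn h; omega
  | succ n ih =>
      intro f₁ f₂ v fn hn h1 h2
      match f₁, f₂, h1, h2 with
      | a+1, b+1, h1, h2 =>
        by_cases hfn : fn ∈ v
        · simp [pvVisitB, hfn]
        · have hunf : ∀ (f : Nat), pvVisitB graph (f+1) v fn =
              ((pvAdj graph fn).reverse).foldl (fun u c => pvVisitB graph f u c)
                (PySem.Set.add v fn) := by
            intro f; simp [pvVisitB, hfn]
          rw [hunf a, hunf b]
          by_cases hkey : fn ∈ graph.map Prod.fst
          · have hlt := pvK_add_lt graph v fn hkey hfn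
            refine pv_foldl_congr_inv (w := PySem.Set.add v fn)
              (fun u c => pvVisitB_prefix graph a u c) ?_ _ _ (fun x hx => hx)
            intro u c hu
            have hKu : pvK graph u ≤ pvK graph (PySem.Set.add v fn) := pvK_mono graph _ _ hu
            exact ih a b u c (by omega) (by omega) (by omega)
          · rw [pvAdj_eq_nil graph fn hkey]
            rfl

lemma pv_getLast!_concat (l : List String) (a : String) : (l ++ [a]).getLast! = a := by
  induction l with
  | nil => rfl
  | cons h t ih =>
      cases ht : t ++ [a] with
      | nil => simp at ht
      | cons x xs =>
          have hx : ((h :: t) ++ [a]) = h :: x :: xs := by rw [List.cons_append, ht]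
          rw [hx]
          have h2 : (h :: x :: xs).getLast! = (x :: xs).getLast! := rfl
          rw [h2, ← ht, ih]

lemma pvLoopA_concat (graph : List (String × List String)) (f : Nat) (v : PySem.Set String)
    (rest : List String) (fn : String) :
    pvLoopA graph (f+1) v (rest ++ [fn]) =
      if PySem.Set.contains v fn then pvLoopA graph f v rest
      else pvLoopA graph f (PySem.Set.add v fn)
        ((pvAdj graph fn).foldl
          (fun st c => if PySem.Set.contains (PySem.Set.add v fn) c then st else st ++ [c]) rest) := by
  cases hr : rest ++ [fn] with
  | nil => simp at hr
  | cons h t =>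
      have h1 : (h :: t).getLast! = fn := by
        rw [← hr, pv_getLast!_concat]
      have h2 : (h :: t).dropLast = rest := by
        rw [← hr, List.dropLast_concat]
      show (if PySem.Set.contains v ((h :: t).getLast!) then
          pvLoopA graph f v ((h :: t).dropLast)
        else
          pvLoopA graph f (PySem.Set.add v ((h :: t).getLast!))
            ((pvAdj graph ((h :: t).getLast!)).foldl
              (fun st c => if PySem.Set.contains (PySem.Set.add v ((h :: t).getLast!)) c then st
                else st ++ [c]) ((h :: t).dropLast))) = _
      rw [h1, h2]

lemma pvLoopA_eq (graph : List (String × List String)) :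
    ∀ (fA : Nat) (v : PySem.Set String) (stack : List String),
      stack.length + pvP graph v ≤ fA →
      pvLoopA graph fA v stack =
        stack.reverse.foldl (fun u fn => pvVisitB graph (graph.length + 1) u fn) v := by
  intro fA
  induction fA with
  | zero =>
      intro v stack hf
      have : stack = [] := by
        cases stack with
        | nil => rfl
        | cons h t => simp at hf
      subst this
      rfl
  | succ fA ih =>
      intro v stack hf
      rcases stack.eq_nil_or_concat with rfl | ⟨rest, fn, rfl⟩
      · rfl
      · simp only [List.concat_eq_append] at hf ⊢
        rw [pvLoopA_concat]
        have hrev : (rest ++ [fn]).reverse = fn :: rest.reverse := by simp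
        rw [hrev, List.foldl_cons]
        have hlen : (rest ++ [fn]).length = rest.length + 1 := by simp
        by_cases hfn : fn ∈ v
        · rw [if_pos ((pv_contains_iff v fn).mpr hfn)]
          rw [pvVisitB_skip graph _ v fn hfn]
          exact ih v rest (by omega)
        · rw [if_neg (by rw [pv_contains_iff]; exact hfn)]
          set v' := PySem.Set.add v fn with hv'
          set cs := pvAdj graph fn with hcs
          have hPadd : pvP graph v' + cs.length ≤ pvP graph v := by
            rw [hv', hcs]
            exact pvP_add graph v fn hfn
          -- the pushed suffix: A's inner for-loop appends the unvisited callees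
          have hfold : cs.foldl
              (fun st c => if PySem.Set.contains v' c then st else st ++ [c]) rest =
              rest ++ cs.filter (fun c => !(PySem.Set.contains v' c)) := by
            have hfun : (fun (st : List String) c =>
                if PySem.Set.contains v' c = true then st else st ++ [c]) =
                (fun (st : List String) c =>
                  if (!(PySem.Set.contains v' c)) = true then st ++ [c] else st) := by
              funext st c
              cases hc : PySem.Set.contains v' c <;> simp
            have h := PySem.List.foldl_append_if (fun c => !(PySem.Set.contains v' c))
              (fun c => c) cs rest
            rw [hfun]
            simpa using h
          rw [hfold]
          set filt := cs.filter (fun c => !(PySem.Set.contains v' c)) with hfilt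
          have hflen : filt.length ≤ cs.length := List.length_filter_le _ _
          have hih := ih v' (rest ++ filt) (by simp only [List.length_append]; omega)
          rw [hih]
          -- now both sides are B-side folds
          have hsplit : (rest ++ filt).reverse.foldl
              (fun u fn => pvVisitB graph (graph.length + 1) u fn) v' =
              rest.reverse.foldl (fun u fn => pvVisitB graph (graph.length + 1) u fn)
                (filt.reverse.foldl (fun u fn => pvVisitB graph (graph.length + 1) u fn) v') := by
            rw [List.reverse_append, List.foldl_append]
          rw [hsplit]
          congr 1
          -- filt.reverse fold = cs.reverse fold (skipped elements are already in v')
          have hfiltrev : filt.reverse = cs.reverse.filter (fun c => !(PySem.Set.contains v' c)) := by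
            rw [hfilt, List.filter_reverse]
          have hskipf : filt.reverse.foldl (fun u fn => pvVisitB graph (graph.length + 1) u fn) v' =
              cs.reverse.foldl (fun u fn => pvVisitB graph (graph.length + 1) u fn) v' := by
            rw [hfiltrev]
            exact pv_foldl_skip_filter (w := v')
              (fun u c => pvVisitB_prefix graph _ u c)
              (fun u c hc => pvVisitB_skip graph _ u c hc)
              cs.reverse v' (fun x hx => hx)
          rw [hskipf]
          -- and cs.reverse fold = visit v fn at full fuel
          have hunf : pvVisitB graph (graph.length + 1) v fn =
              cs.reverse.foldl (fun u c => pvVisitB graph graph.length u c) v' := by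
            simp [pvVisitB, hfn, hcs, hv']
          rw [hunf]
          by_cases hkey : fn ∈ graph.map Prod.fst
          · have hlt : pvK graph v' < pvK graph v := by
              rw [hv']
              exact pvK_add_lt graph v fn hkey hfn
            have hKv := pvK_le graph v
            refine (pv_foldl_congr_inv (w := v')
              (fun u c => pvVisitB_prefix graph _ u c) ?_ cs.reverse v' (fun x hx => hx)).symm
            intro u c hu
            have hKu : pvK graph u ≤ pvK graph v' := pvK_mono graph _ _ hu
            exact pvVisitB_fuel_congr graph (pvK graph u + 1) _ _ u c (by omega) (by omega) (by omega)
          · rw [hcs, pvAdj_eq_nil graph fn hkey]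
            rfl

-- ===== VERDICT (by name: the statement is the Claim_ definition above) =====
theorem transitive_reachable_py_spec : Claim_equal_transitive_reachable_py := by
  intro graph roots _
  unfold Spec_transitive_reachable_py transitive_reachable_py transitive_reachable_py_alt
  have hP : pvP graph PySem.Set.empty = (graph.map (fun p => p.2.length)).sum := by
    simp [pvP, PySem.Set.empty, PySem.Set.contains]
  rw [pvLoopA_eq graph _ _ _ (by rw [hP]; omega)]
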